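-- pv_equiv track=rewrite | github.com/DanielSCGray/Algo_Practice | chess_moves.py | alt_safe_squares
-- ===== SOURCE A (Python) =====
-- def all_safe_squares(queen: tuple):
--     safe_squares = []
--     for i in range(8):
--         if i == queen[0]:
--             continue
--         for j in range(8):
--             if j == queen[1]:
--                 continue
--             if i + j == queen[0] + queen[1] or i - j == queen[0] - queen[1]:
--                 continue
--             safe_squares.append((i,j))
--     return safe_squares
--
-- def alt_safe_squares(queen_list, safe_squares=None):
--     if len(queen_list) == 0:
--         return safe_squares
--     if safe_squares == None:
--         q = queen_list.pop()
--         safe = all_safe_squares(q)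
--         return alt_safe_squares(queen_list, safe)
--     queen = queen_list.pop()
--     new_safe_s = []
--     for move in safe_squares:
--         if move[0] == queen[0] or move[1] == queen[1] or move[0] + move[1] == queen[0] + queen[1] or move[0] - move[1] == queen[0] - queen[1]:
--             continue
--         else:
--             new_safe_s.append(move)
--     return alt_safe_squares(queen_list, new_safe_s)
-- ===== SOURCE B (Python) =====
-- # B: iterative while-loop with pop() replacing A's tail recursion; return-value equivalence (both mutate queen_list identically).
-- def all_safe_squares(queen):
--     return [(i, j)
--             for i in range(8) for j in range(8)
--             if i != queen[0] and j != queen[1]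
--             and i + j != queen[0] + queen[1] and i - j != queen[0] - queen[1]]
--
-- def alt_safe_squares(queen_list, safe_squares=None):
--     while queen_list:
--         queen = queen_list.pop()
--         if safe_squares is None:
--             safe_squares = all_safe_squares(queen)
--         else:
--             safe_squares = [m for m in safe_squares
--                             if m[0] != queen[0] and m[1] != queen[1]
--                             and m[0] + m[1] != queen[0] + queen[1]
--                             and m[0] - m[1] != queen[0] - queen[1]]
--     return safe_squares
-- ===== Notes on version B (the rewrite author's own statement) =====
-- stated objective: idiomatic
-- what changed: Replaced A's tail recursion (and its explicit-loop-with-continue filters) by a single iterative while/pop loop that reassigns safe_squares via list comprehensions.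
-- outside the precondition, e.g. on alt_safe_squares([], None): A returns None, B returns None
import Mathlib
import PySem

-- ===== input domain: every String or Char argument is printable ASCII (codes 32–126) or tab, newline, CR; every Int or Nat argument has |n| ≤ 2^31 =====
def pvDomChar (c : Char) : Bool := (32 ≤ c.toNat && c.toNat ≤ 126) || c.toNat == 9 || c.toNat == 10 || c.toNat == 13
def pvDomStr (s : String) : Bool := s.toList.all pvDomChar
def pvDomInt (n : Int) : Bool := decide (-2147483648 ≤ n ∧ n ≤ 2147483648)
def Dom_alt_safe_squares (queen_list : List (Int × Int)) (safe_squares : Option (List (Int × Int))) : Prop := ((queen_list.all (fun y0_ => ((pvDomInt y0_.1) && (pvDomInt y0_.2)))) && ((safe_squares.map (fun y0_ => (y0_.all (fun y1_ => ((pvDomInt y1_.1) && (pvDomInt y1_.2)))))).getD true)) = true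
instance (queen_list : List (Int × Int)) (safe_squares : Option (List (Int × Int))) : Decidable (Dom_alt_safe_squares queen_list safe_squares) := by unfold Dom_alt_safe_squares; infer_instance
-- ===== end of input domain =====

-- B replaces A's tail recursion by an iterative pop-loop with comprehension filters; return-value
-- equivalence only (both Pythons pop queen_list in place identically).

-- ===== PORT A =====
def allSafeA (q : Int × Int) : List (Int × Int) :=
  (PySem.List.pyRange 0 8 1).foldl (fun acc i =>
    if i = q.1 then acc
    else (PySem.List.pyRange 0 8 1).foldl (fun acc2 j =>
      if j = q.2 then acc2
      else if i + j = q.1 + q.2 ∨ i - j = q.1 - q.2 then acc2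
      else acc2 ++ [(i, j)]) acc) []

def alt_safe_squares (queen_list : List (Int × Int)) (safe_squares : Option (List (Int × Int))) : List (Int × Int) :=
  if h : queen_list = [] then safe_squares.getD []  -- Python returns safe_squares; the None case is excluded by Pre_
  else
    match safe_squares with
    | none => alt_safe_squares queen_list.dropLast (some (allSafeA (queen_list.getLast h)))
    | some s =>
      let q := queen_list.getLast h
      alt_safe_squares queen_list.dropLast (some (s.foldl (fun acc m =>
        if m.1 = q.1 ∨ m.2 = q.2 ∨ m.1 + m.2 = q.1 + q.2 ∨ m.1 - m.2 = q.1 - q.2 then acc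
        else acc ++ [m]) []))
termination_by queen_list.length
decreasing_by
  all_goals (have := List.length_pos_of_ne_nil h; simp [List.length_dropLast]; omega)

-- ===== PORT B =====
def allSafeB (q : Int × Int) : List (Int × Int) :=
  (PySem.List.pyRange 0 8 1).flatMap (fun i =>
    ((PySem.List.pyRange 0 8 1).filter (fun j =>
      decide (i ≠ q.1 ∧ j ≠ q.2 ∧ i + j ≠ q.1 + q.2 ∧ i - j ≠ q.1 - q.2))).map (fun j => (i, j)))

-- one iteration of the while loop: pop queen q, seed or re-filter safe_squares
def stepB (ss : Option (List (Int × Int))) (q : Int × Int) : Option (List (Int × Int)) :=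
  match ss with
  | none => some (allSafeB q)
  | some s => some (s.filter (fun m =>
      decide (m.1 ≠ q.1 ∧ m.2 ≠ q.2 ∧ m.1 + m.2 ≠ q.1 + q.2 ∧ m.1 - m.2 ≠ q.1 - q.2)))

def alt_safe_squares_alt (queen_list : List (Int × Int)) (safe_squares : Option (List (Int × Int))) : List (Int × Int) :=
  (queen_list.reverse.foldl stepB safe_squares).getD []

-- ===== PRECONDITION & SPEC =====
-- Pre_ excludes only queen_list = [] with safe_squares = None, where Python A returns None, not a list.
def Pre_alt_safe_squares (queen_list : List (Int × Int)) (safe_squares : Option (List (Int × Int))) : Prop :=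
  queen_list ≠ [] ∨ safe_squares ≠ none
instance (queen_list : List (Int × Int)) (safe_squares : Option (List (Int × Int))) : Decidable (Pre_alt_safe_squares queen_list safe_squares) := by unfold Pre_alt_safe_squares; infer_instance
def pvWitness_alt_safe_squares : (List (Int × Int)) × (Option (List (Int × Int))) := ([(0, 0)], none)

def Spec_alt_safe_squares (queen_list : List (Int × Int)) (safe_squares : Option (List (Int × Int))) (out : List (Int × Int)) : Prop := out = alt_safe_squares_alt queen_list safe_squares
instance (queen_list : List (Int × Int)) (safe_squares : Option (List (Int × Int))) (out : List (Int × Int)) : Decidable (Spec_alt_safe_squares queen_list safe_squares out) := by unfold Spec_alt_safe_squares; infer_instance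

-- ===== CLAIM (what is proved, stated in full; the proofs are below) =====
def Claim_equal_alt_safe_squares : Prop := ∀ (queen_list : List (Int × Int)) (safe_squares : Option (List (Int × Int))), Dom_alt_safe_squares queen_list safe_squares → Pre_alt_safe_squares queen_list safe_squares → Spec_alt_safe_squares queen_list safe_squares (alt_safe_squares queen_list safe_squares)

-- ===== LEMMAS AND PROOFS =====

-- A's append-or-continue loop over safe_squares IS B's comprehension filter
lemma filt_eq (q : Int × Int) : ∀ (s : List (Int × Int)) (acc : List (Int × Int)),
    s.foldl (fun acc m =>
      if m.1 = q.1 ∨ m.2 = q.2 ∨ m.1 + m.2 = q.1 + q.2 ∨ m.1 - m.2 = q.1 - q.2 then acc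
      else acc ++ [m]) acc
    = acc ++ s.filter (fun m =>
      decide (m.1 ≠ q.1 ∧ m.2 ≠ q.2 ∧ m.1 + m.2 ≠ q.1 + q.2 ∧ m.1 - m.2 ≠ q.1 - q.2)) := by
  intro s
  induction s with
  | nil => intro acc; simp
  | cons m s ih =>
    intro acc
    by_cases hC : m.1 = q.1 ∨ m.2 = q.2 ∨ m.1 + m.2 = q.1 + q.2 ∨ m.1 - m.2 = q.1 - q.2
    · have hp : ¬ (m.1 ≠ q.1 ∧ m.2 ≠ q.2 ∧ m.1 + m.2 ≠ q.1 + q.2 ∧ m.1 - m.2 ≠ q.1 - q.2) := by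
        tauto
      simp only [List.foldl_cons, if_pos hC, ih, List.filter_cons]
      simp [hp]
    · have hp : m.1 ≠ q.1 ∧ m.2 ≠ q.2 ∧ m.1 + m.2 ≠ q.1 + q.2 ∧ m.1 - m.2 ≠ q.1 - q.2 := by
        tauto
      simp only [List.foldl_cons, if_neg hC, ih, List.filter_cons]
      simp [hp.1, hp.2.1, hp.2.2.1, hp.2.2.2]

-- A's inner j-loop (for a row i ≠ q.1) IS the filtered-and-mapped row of B's comprehension
lemma inner_eq (a b i : Int) (hi : i ≠ a) : ∀ (js : List Int) (acc : List (Int × Int)),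
    js.foldl (fun acc2 j =>
      if j = b then acc2
      else if i + j = a + b ∨ i - j = a - b then acc2
      else acc2 ++ [(i, j)]) acc
    = acc ++ (js.filter (fun j =>
        decide (i ≠ a ∧ j ≠ b ∧ i + j ≠ a + b ∧ i - j ≠ a - b))).map (fun j => (i, j)) := by
  intro js
  induction js with
  | nil => intro acc; simp
  | cons j js ih =>
    intro acc
    by_cases hj : j = b
    · simp only [List.foldl_cons, if_pos hj, List.filter_cons, decide_eq_true_eq]
      have : ¬ (i ≠ a ∧ j ≠ b ∧ i + j ≠ a + b ∧ i - j ≠ a - b) := by tauto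
      simp [this, ih]
    · by_cases hd : i + j = a + b ∨ i - j = a - b
      · simp only [List.foldl_cons, if_neg hj, if_pos hd, List.filter_cons, decide_eq_true_eq]
        have : ¬ (i ≠ a ∧ j ≠ b ∧ i + j ≠ a + b ∧ i - j ≠ a - b) := by tauto
        simp [this, ih]
      · simp only [List.foldl_cons, if_neg hj, if_neg hd, List.filter_cons, decide_eq_true_eq]
        have : i ≠ a ∧ j ≠ b ∧ i + j ≠ a + b ∧ i - j ≠ a - b := by tauto
        simp [this, ih]

lemma allSafe_eq (q : Int × Int) : allSafeA q = allSafeB q := by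
  obtain ⟨a, b⟩ := q
  unfold allSafeA allSafeB
  simp only []
  have outer : ∀ (is : List Int) (acc : List (Int × Int)),
      is.foldl (fun acc i =>
        if i = a then acc
        else (PySem.List.pyRange 0 8 1).foldl (fun acc2 j =>
          if j = b then acc2
          else if i + j = a + b ∨ i - j = a - b then acc2
          else acc2 ++ [(i, j)]) acc) acc
      = acc ++ is.flatMap (fun i =>
          ((PySem.List.pyRange 0 8 1).filter (fun j =>
            decide (i ≠ a ∧ j ≠ b ∧ i + j ≠ a + b ∧ i - j ≠ a - b))).map (fun j => (i, j))) := by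
    intro is
    induction is with
    | nil => intro acc; simp
    | cons i is ih =>
      intro acc
      by_cases hi : i = a
      · have hfilt : (PySem.List.pyRange 0 8 1).filter (fun j =>
            decide (i ≠ a ∧ j ≠ b ∧ i + j ≠ a + b ∧ i - j ≠ a - b)) = [] := by
          subst hi; simp
        simp only [List.foldl_cons, if_pos hi, List.flatMap_cons, hfilt]
        simp [ih]
      · simp only [List.foldl_cons, if_neg hi, List.flatMap_cons, inner_eq a b i hi]
        simp [ih]
  simpa using outer (PySem.List.pyRange 0 8 1) []

-- A's recursion unrolls to B's fold over the reversed queen list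
lemma main_eq : ∀ (ql : List (Int × Int)) (ss : Option (List (Int × Int))),
    alt_safe_squares ql ss = (ql.reverse.foldl stepB ss).getD [] := by
  intro ql
  induction ql using List.reverseRecOn with
  | nil => intro ss; unfold alt_safe_squares; simp
  | append_singleton l a ih =>
    intro ss
    have hne : l ++ [a] ≠ [] := by simp
    rw [alt_safe_squares]
    rw [dif_neg hne]
    have hlast : (l ++ [a]).getLast hne = a := by simp
    have hdrop : (l ++ [a]).dropLast = l := by simp
    cases ss with
    | none =>
      simp only [hlast, hdrop, ih]
      simp [stepB, allSafe_eq]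
    | some s =>
      simp only [hlast, hdrop, ih, filt_eq]
      simp [stepB]

-- ===== VERDICT (by name: the statement is the Claim_ definition above) =====
theorem alt_safe_squares_spec : Claim_equal_alt_safe_squares := by
  intro ql ss _ _
  unfold Spec_alt_safe_squares alt_safe_squares_alt
  exact main_eq ql ss
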